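-- pv_equiv track=rewrite | github.com/pypi-data/pypi-mirror-91 | packages/crnverifier/crnverifier-0.3-py3-none-any.whl/crnverifier/utils.py | assign_crn_species
-- ===== SOURCE A (Python) =====
-- def assign_crn_species(crn, signals):
--     """ Returns types of species in a given CRN.
--
--     On the types of species in an implementation CRN:
--         - Signal species are implementation species that (are supposed to)
--           correspond to formal species in a formal CRN.
--         - Fuel species are implementation species that are required for some
--           reactions and are assumed to be present, always.
--         - Waste species are chemically inert byproducts that never react.
--         - Reactive waste species are byproducts of a reaction that can react,
--           but only with fuels or other reactive waste species to produce
--           exclusively (reactive) waste species. A typical example for reactive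
--           wastes are so-called garbage collection mechanisms to turn an
--           undesired waste into a desired waste.
--         - Intermediate species are all other species that do not fall in any
--           above category.
--
--     Returns:
--         set(): intermediates
--         set(): wastes
--         set(): reactive wastes
--     """
--     species = set().union(*[set().union(*rxn[:2]) for rxn in crn])
--     # A signal species cannot be considered waste.
--     assert isinstance(signals, set)
--     nonwastes = signals.copy()
--     wastes = set()
--
--     while True:
--         # Add x to non-waste if in any reaction x is an reactant while there
--         # are non-wastes taking part in the reaction. Reset the outer loop if
--         # a new non-waste species is found.
--         flag = False
--         for x in species:
--             if x in nonwastes: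
--                 continue
--             for rxn in crn:
--                 if x in rxn[0] and len(nonwastes & set(rxn[0] + rxn[1])):
--                     nonwastes.add(x)
--                     flag = True
--                     break
--         if not flag:
--             break
--
--      # Inert and reactive waste species.
--     wastes = species - nonwastes
--
--     # An intermediate species
--     intermediates = species - signals - wastes
--
--     # Let's assert here, to find the problems.
--     reactive_waste = set()
--     for w in list(wastes):
--         if any(w in rxn[0] for rxn in crn):
--             reactive_waste.add(w)
--
--     return intermediates, wastes, reactive_waste
-- ===== SOURCE B (Python) =====
-- def assign_crn_species(crn, signals):
--     # Worklist (BFS) propagation of non-waste status instead of A's repeated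
--     # full sweeps: each newly discovered non-waste is queued once and its
--     # reactions are relaxed once.
--     species = []
--     seen = set()
--     for rxn in crn:
--         for x in rxn[0] + rxn[1]:
--             if x not in seen:
--                 seen.add(x)
--                 species.append(x)
--     nonwaste = set(signals)
--     queue = list(nonwaste)
--     head = 0
--     while head < len(queue):
--         s = queue[head]
--         head += 1
--         for rxn in crn:
--             if s in rxn[0] or s in rxn[1]:
--                 for x in rxn[0]:
--                     if x not in nonwaste:
--                         nonwaste.add(x)
--                         queue.append(x)
--     wastes = {x for x in species if x not in nonwaste}
--     intermediates = {x for x in species if x in nonwaste and x not in signals}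
--     reactive_waste = {w for w in wastes if any(w in rxn[0] for rxn in crn)}
--     return intermediates, wastes, reactive_waste
-- ===== Notes on version B (the rewrite author's own statement) =====
-- stated objective: alternative
-- what changed: A repeatedly sweeps all species against all reactions until a full pass adds no new non-waste; B instead does a single worklist (BFS) propagation - each species is queued once when it becomes non-waste and relaxes the reactions containing it - and the three output sets become single filters of the species list; worst-case cost drops from quadratically many sweeps to one relaxation per discovered species, though on random CRNs (which converge in few sweeps) the measured times are comparable.
import Mathlib
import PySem

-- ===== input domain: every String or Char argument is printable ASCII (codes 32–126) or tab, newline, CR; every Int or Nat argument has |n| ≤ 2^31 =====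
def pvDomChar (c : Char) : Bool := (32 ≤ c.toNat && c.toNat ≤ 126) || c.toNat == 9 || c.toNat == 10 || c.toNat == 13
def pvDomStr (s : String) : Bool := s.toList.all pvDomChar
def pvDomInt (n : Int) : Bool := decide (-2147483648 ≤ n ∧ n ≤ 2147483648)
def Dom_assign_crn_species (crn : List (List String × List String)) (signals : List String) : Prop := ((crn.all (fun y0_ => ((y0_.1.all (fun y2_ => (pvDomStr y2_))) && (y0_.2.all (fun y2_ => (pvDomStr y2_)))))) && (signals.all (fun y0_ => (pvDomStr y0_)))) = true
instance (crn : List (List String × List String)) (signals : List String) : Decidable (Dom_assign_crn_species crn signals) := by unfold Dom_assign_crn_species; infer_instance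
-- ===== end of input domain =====

-- B replaces A's repeated full fixed-point sweeps by a single worklist (BFS) propagation of
-- non-waste status; the returned Python sets (compared as sets) are identical.

-- ===== PORT A =====
-- A's inner 'for rxn in crn: … break' only adds x and sets the flag, so it is ported as 'any'.
def pvCondA (crn : List (List String × List String)) (nw : PySem.Set String) (x : String) : Bool :=
  crn.any (fun rxn => rxn.1.contains x && (PySem.Set.len (PySem.Set.inter nw (PySem.Set.ofList (rxn.1 ++ rxn.2))) != 0))

def pvStepA (crn : List (List String × List String)) (st : PySem.Set String × Bool) (x : String) : PySem.Set String × Bool :=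
  if PySem.Set.contains st.1 x then st
  else if pvCondA crn st.1 x then (PySem.Set.add st.1 x, true) else st

-- one pass of A's 'for x in species' body (flag starts False)
def pvPassA (crn : List (List String × List String)) (species : List String) (nw : PySem.Set String) : PySem.Set String × Bool :=
  species.foldl (pvStepA crn) (nw, false)

-- A's 'while True' loop; fuel species.length + 1 always suffices because every
-- repeated pass has added at least one member of species (pv_loopA_spec below).
def pvLoopA (crn : List (List String × List String)) (species : List String) : Nat → PySem.Set String → PySem.Set String
  | 0, nw => nw
  | fuel+1, nw =>
    let st := pvPassA crn species nw
    if st.2 then pvLoopA crn species fuel st.1 else st.1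

def assign_crn_species (crn : List (List String × List String)) (signals : List String) : List String × List String × List String :=
  let species : PySem.Set String := crn.foldl (fun s rxn => PySem.Set.union s (PySem.Set.ofList (rxn.1 ++ rxn.2))) PySem.Set.empty
  let nonwastes := pvLoopA crn species (species.length + 1) (PySem.Set.ofList signals)
  let wastes := PySem.Set.diff species nonwastes
  let intermediates := PySem.Set.diff (PySem.Set.diff species (PySem.Set.ofList signals)) wastes
  let reactive := wastes.foldl (fun acc w => if crn.any (fun rxn => rxn.1.contains w) then PySem.Set.add acc w else acc) PySem.Set.empty
  (intermediates, wastes, reactive)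

-- ===== PORT B =====
def pvSpeciesB (crn : List (List String × List String)) : PySem.Set String :=
  crn.foldl (fun s rxn => (rxn.1 ++ rxn.2).foldl PySem.Set.add s) PySem.Set.empty

def pvStepB (st : PySem.Set String × List String) (x : String) : PySem.Set String × List String :=
  if PySem.Set.contains st.1 x then st else (PySem.Set.add st.1 x, st.2 ++ [x])

-- B's loop body for one reaction, for the popped species s
def pvRelaxStep (s : String) (st : PySem.Set String × List String) (rxn : List String × List String) : PySem.Set String × List String :=
  if rxn.1.contains s || rxn.2.contains s then rxn.1.foldl pvStepB st else st

-- B's body for one popped species s: relax every reaction containing s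
def pvRelaxB (crn : List (List String × List String)) (s : String) (st : PySem.Set String × List String) : PySem.Set String × List String :=
  crn.foldl (pvRelaxStep s) st

-- B's worklist loop (queue popped at the front); fuel |set(signals)| + |species|
-- always suffices because each element is enqueued at most once (pv_bfsB_spec below).
def pvBfsB (crn : List (List String × List String)) : Nat → PySem.Set String → List String → PySem.Set String
  | 0, nw, _ => nw
  | _+1, nw, [] => nw
  | fuel+1, nw, s :: rest =>
    let st := pvRelaxB crn s (nw, rest)
    pvBfsB crn fuel st.1 st.2

def assign_crn_species_alt (crn : List (List String × List String)) (signals : List String) : List String × List String × List String :=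
  let species := pvSpeciesB crn
  let sig := PySem.Set.ofList signals
  let nonwaste := pvBfsB crn (sig.length + species.length) sig sig
  let wastes := species.filter (fun x => !(PySem.Set.contains nonwaste x))
  let intermediates := species.filter (fun x => PySem.Set.contains nonwaste x && !(PySem.Set.contains sig x))
  let reactive := wastes.filter (fun w => crn.any (fun rxn => rxn.1.contains w))
  (intermediates, wastes, reactive)

-- ===== PRECONDITION & SPEC =====
def Spec_assign_crn_species (crn : List (List String × List String)) (signals : List String) (out : List String × List String × List String) : Prop := out = assign_crn_species_alt crn signals
instance (crn : List (List String × List String)) (signals : List String) (out : List String × List String × List String) : Decidable (Spec_assign_crn_species crn signals out) := by unfold Spec_assign_crn_species; infer_instance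

-- ===== CLAIM (what is proved, stated in full; the proofs are below) =====
def Claim_equal_assign_crn_species : Prop := ∀ (crn : List (List String × List String)) (signals : List String), Dom_assign_crn_species crn signals → Spec_assign_crn_species crn signals (assign_crn_species crn signals)

-- ===== LEMMAS AND PROOFS =====

-- the common closure: x is a non-waste
inductive pvNW (crn : List (List String × List String)) (signals : List String) : String → Prop where
  | sig {x : String} : x ∈ signals → pvNW crn signals x
  | step {rxn : List String × List String} {y x : String} :
      rxn ∈ crn → y ∈ rxn.1 ++ rxn.2 → pvNW crn signals y → x ∈ rxn.1 → pvNW crn signals x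

theorem pv_contains_eq (s : List String) (x : String) :
    PySem.Set.contains s x = decide (x ∈ s) := by
  by_cases h : x ∈ s
  · simp [h]
  · have h2 : PySem.Set.contains s x ≠ true := fun hc => h ((PySem.Set.contains_iff s x).mp hc)
    simp at h2
    simp [h2]

-- species lists of the two ports coincide
theorem pv_update_ofList (l : List String) : ∀ (s : PySem.Set String),
    PySem.Set.update s (PySem.Set.ofList l) = PySem.Set.update s l := by
  induction l using List.reverseRecOn with
  | nil => intro s; rfl
  | append_singleton l x ih =>
    intro s
    rw [PySem.Set.ofList_append_singleton]
    by_cases hx : x ∈ PySem.Set.ofList l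
    · rw [PySem.Set.add_of_mem hx, ih, PySem.Set.update_append]
      have hxl : x ∈ l := (PySem.Set.mem_ofList l x).mp hx
      have hxu : x ∈ PySem.Set.update s l := (PySem.Set.mem_update s l x).mpr (Or.inr hxl)
      show PySem.Set.update s l = PySem.Set.add (PySem.Set.update s l) x
      rw [PySem.Set.add_of_mem hxu]
    · rw [PySem.Set.add_of_not_mem hx, PySem.Set.update_append, PySem.Set.update_append, ih]

theorem pv_speciesA_eq (crn : List (List String × List String)) :
    crn.foldl (fun s rxn => PySem.Set.union s (PySem.Set.ofList (rxn.1 ++ rxn.2))) PySem.Set.empty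
      = pvSpeciesB crn := by
  unfold pvSpeciesB
  suffices h : ∀ (init : PySem.Set String),
      crn.foldl (fun s rxn => PySem.Set.union s (PySem.Set.ofList (rxn.1 ++ rxn.2))) init
        = crn.foldl (fun s rxn => (rxn.1 ++ rxn.2).foldl PySem.Set.add s) init from h _
  induction crn with
  | nil => intro init; rfl
  | cons rxn crn ih =>
    intro init
    simp only [List.foldl_cons]
    rw [show PySem.Set.union init (PySem.Set.ofList (rxn.1 ++ rxn.2))
          = PySem.Set.update init (PySem.Set.ofList (rxn.1 ++ rxn.2)) from rfl,
        pv_update_ofList]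
    exact ih _

theorem pv_mem_speciesB (crn : List (List String × List String)) (x : String) :
    x ∈ pvSpeciesB crn ↔ ∃ rxn ∈ crn, x ∈ rxn.1 ++ rxn.2 := by
  unfold pvSpeciesB
  suffices h : ∀ (crn : List (List String × List String)) (init : PySem.Set String),
      x ∈ crn.foldl (fun s rxn => (rxn.1 ++ rxn.2).foldl PySem.Set.add s) init
        ↔ x ∈ init ∨ ∃ rxn ∈ crn, x ∈ rxn.1 ++ rxn.2 by
    rw [h]
    simp [PySem.Set.empty]
  intro crn
  induction crn with
  | nil => intro init; simp
  | cons rxn crn ih =>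
    intro init
    rw [List.foldl_cons, ih]
    have hu : x ∈ (rxn.1 ++ rxn.2).foldl PySem.Set.add init ↔ x ∈ init ∨ x ∈ rxn.1 ++ rxn.2 :=
      PySem.Set.mem_update init (rxn.1 ++ rxn.2) x
    rw [hu]
    simp only [List.mem_cons]
    constructor
    · rintro ((h | h) | ⟨r, hr, hx⟩)
      · exact Or.inl h
      · exact Or.inr ⟨rxn, Or.inl rfl, h⟩
      · exact Or.inr ⟨r, Or.inr hr, hx⟩
    · rintro (h | ⟨r, (rfl | hr), hx⟩)
      · exact Or.inl (Or.inl h)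
      · exact Or.inl (Or.inr hx)
      · exact Or.inr ⟨r, hr, hx⟩

theorem pv_nodup_speciesB (crn : List (List String × List String)) :
    (pvSpeciesB crn).Nodup := by
  unfold pvSpeciesB
  suffices h : ∀ (crn : List (List String × List String)) (init : PySem.Set String), init.Nodup →
      (crn.foldl (fun s rxn => (rxn.1 ++ rxn.2).foldl PySem.Set.add s) init).Nodup from
    h crn PySem.Set.empty List.nodup_nil
  intro crn
  induction crn with
  | nil => intro init hi; exact hi
  | cons rxn crn ih =>
    intro init hi
    exact ih _ (PySem.Set.nodup_update init (rxn.1 ++ rxn.2) hi)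

-- counting helpers
theorem pv_countP_lt (l : List String) (p q : String → Bool)
    (hpq : ∀ x ∈ l, q x = true → p x = true)
    (x : String) (hx : x ∈ l) (hp : p x = true) (hq : q x = false) :
    l.countP q < l.countP p := by
  induction l with
  | nil => simp at hx
  | cons a l ih =>
    rw [List.countP_cons, List.countP_cons]
    rcases List.mem_cons.mp hx with rfl | hx'
    · have h1 : l.countP q ≤ l.countP p :=
        List.countP_mono_left (fun y hy => hpq y (List.mem_cons_of_mem _ hy))
      simp [hp, hq]
      omega
    · have h1 := ih (fun y hy h => hpq y (List.mem_cons_of_mem _ hy) h) hx'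
      have h2 : (if q a = true then 1 else 0) ≤ (if p a = true then 1 else 0) := by
        by_cases hqa : q a = true
        · simp [hqa, hpq a (List.mem_cons_self) hqa]
        · simp [hqa]
      omega

theorem pv_countP_point (S : List String) (p q : String → Bool) (x : String)
    (hS : S.Nodup) (hx : x ∈ S) (hagree : ∀ y ∈ S, y ≠ x → p y = q y)
    (hp : p x = false) (hq : q x = true) :
    S.countP p + 1 = S.countP q := by
  induction S with
  | nil => simp at hx
  | cons a S ih =>
    rw [List.countP_cons, List.countP_cons]
    rcases List.mem_cons.mp hx with rfl | hx'
    · have hnx : x ∉ S := (List.nodup_cons.mp hS).1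
      have hc : S.countP p = S.countP q :=
        List.countP_congr (fun y hy => by
          rw [hagree y (List.mem_cons_of_mem _ hy) (fun h => hnx (h ▸ hy))])
      simp [hp, hq, hc]
    · have hax : a ≠ x := fun h => (List.nodup_cons.mp hS).1 (h ▸ hx')
      have hpa := hagree a (List.mem_cons_self) hax
      have hmain := ih (List.nodup_cons.mp hS).2 hx'
        (fun y hy hne => hagree y (List.mem_cons_of_mem _ hy) hne)
      rw [hpa]
      omega

theorem pv_condA_iff (crn : List (List String × List String)) (nw : PySem.Set String) (x : String) :
    pvCondA crn nw x = true ↔ ∃ rxn ∈ crn, x ∈ rxn.1 ∧ ∃ y ∈ nw, y ∈ rxn.1 ++ rxn.2 := by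
  unfold pvCondA
  rw [List.any_eq_true]
  constructor
  · rintro ⟨rxn, hr, hb⟩
    rw [Bool.and_eq_true] at hb
    obtain ⟨h1, h2⟩ := hb
    have hx1 : x ∈ rxn.1 := by simpa using h1
    refine ⟨rxn, hr, hx1, ?_⟩
    have hne : PySem.Set.len (PySem.Set.inter nw (PySem.Set.ofList (rxn.1 ++ rxn.2))) ≠ 0 :=
      bne_iff_ne.mp h2
    cases hI : PySem.Set.inter nw (PySem.Set.ofList (rxn.1 ++ rxn.2)) with
    | nil => rw [hI] at hne; exact absurd rfl hne
    | cons y t =>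
      have hy : y ∈ PySem.Set.inter nw (PySem.Set.ofList (rxn.1 ++ rxn.2)) := by
        rw [hI]; exact List.mem_cons_self
      obtain ⟨hynw, hyo⟩ := (PySem.Set.mem_inter nw _ y).mp hy
      exact ⟨y, hynw, (PySem.Set.mem_ofList _ y).mp hyo⟩
  · rintro ⟨rxn, hr, hx1, y, hynw, hyr⟩
    refine ⟨rxn, hr, ?_⟩
    rw [Bool.and_eq_true]
    constructor
    · simpa using hx1
    · have hyI : y ∈ PySem.Set.inter nw (PySem.Set.ofList (rxn.1 ++ rxn.2)) :=
        (PySem.Set.mem_inter nw _ y).mpr ⟨hynw, (PySem.Set.mem_ofList _ y).mpr hyr⟩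
      have hne : PySem.Set.inter nw (PySem.Set.ofList (rxn.1 ++ rxn.2)) ≠ [] :=
        List.ne_nil_of_mem hyI
      apply bne_iff_ne.mpr
      show ((PySem.Set.inter nw (PySem.Set.ofList (rxn.1 ++ rxn.2))).length : Int) ≠ 0
      have : (PySem.Set.inter nw (PySem.Set.ofList (rxn.1 ++ rxn.2))).length ≠ 0 := by
        intro h0
        exact hne (List.length_eq_zero_iff.mp h0)
      omega

-- ----- A-side pass lemmas -----
theorem pv_stepA_cases (crn : List (List String × List String)) (st : PySem.Set String × Bool) (x : String) :
    pvStepA crn st x = st ∨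
      (x ∉ st.1 ∧ pvCondA crn st.1 x = true ∧ pvStepA crn st x = (PySem.Set.add st.1 x, true)) := by
  unfold pvStepA
  split_ifs with h1 h2
  · exact Or.inl rfl
  · refine Or.inr ⟨?_, h2, rfl⟩
    intro hx
    rw [pv_contains_eq] at h1
    simp [hx] at h1
  · exact Or.inl rfl

theorem pv_passA_mono (crn : List (List String × List String)) :
    ∀ (xs : List String) (st : PySem.Set String × Bool) (y : String),
      y ∈ st.1 → y ∈ (xs.foldl (pvStepA crn) st).1 := by
  intro xs
  induction xs with
  | nil => intro st y hy; exact hy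
  | cons x xs ih =>
    intro st y hy
    rw [List.foldl_cons]
    apply ih
    rcases pv_stepA_cases crn st x with h | ⟨_, _, h⟩
    · rw [h]; exact hy
    · rw [h]; exact (PySem.Set.mem_add st.1 x y).mpr (Or.inl hy)

theorem pv_stepA_flag (crn : List (List String × List String)) (st : PySem.Set String × Bool) (x : String)
    (h : st.2 = true) : (pvStepA crn st x).2 = true := by
  rcases pv_stepA_cases crn st x with he | ⟨_, _, he⟩
  · rw [he]; exact h
  · rw [he]

theorem pv_passA_flag_mono (crn : List (List String × List String)) :
    ∀ (xs : List String) (st : PySem.Set String × Bool),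
      st.2 = true → (xs.foldl (pvStepA crn) st).2 = true := by
  intro xs
  induction xs with
  | nil => intro st h; exact h
  | cons x xs ih =>
    intro st h
    rw [List.foldl_cons]
    exact ih _ (pv_stepA_flag crn st x h)

theorem pv_passA_false (crn : List (List String × List String)) :
    ∀ (xs : List String) (st : PySem.Set String × Bool),
      (xs.foldl (pvStepA crn) st).2 = false →
      (xs.foldl (pvStepA crn) st).1 = st.1 ∧
      (∀ x ∈ xs, x ∉ st.1 → pvCondA crn st.1 x = false) := by
  intro xs
  induction xs with
  | nil => intro st _; exact ⟨rfl, by simp⟩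
  | cons x xs ih =>
    intro st h
    rw [List.foldl_cons] at h ⊢
    have hstep : pvStepA crn st x = st := by
      rcases pv_stepA_cases crn st x with he | ⟨_, _, he⟩
      · exact he
      · exfalso
        have : (xs.foldl (pvStepA crn) (pvStepA crn st x)).2 = true :=
          pv_passA_flag_mono crn xs _ (by rw [he])
        rw [this] at h; exact Bool.noConfusion h
    rw [hstep] at h ⊢
    obtain ⟨h1, h2⟩ := ih st h
    refine ⟨h1, ?_⟩
    intro z hz hzn
    rcases List.mem_cons.mp hz with rfl | hz'
    · -- z = x : the step kept the state, so its condition was false (or z ∈ st.1)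
      rcases pv_stepA_cases crn st z with he | ⟨hn, hc, he⟩
      · -- need: cond false; from hstep branch analysis
        by_cases hcz : pvCondA crn st.1 z = true
        · -- then stepA would have flagged, but stepA st z = st with st.2 = false after…
          -- derive contradiction: unfold
          unfold pvStepA at he
          rw [pv_contains_eq] at he
          simp [hzn, hcz] at he
          -- he : (add st.1 z, true) = st ; so st.2 = true, but foldl flag mono gives final true
          exfalso
          have hst2 : st.2 = true := by rw [← he]
          have : (xs.foldl (pvStepA crn) st).2 = true := pv_passA_flag_mono crn xs st hst2
          rw [this] at h; exact Bool.noConfusion h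
        · simpa using hcz
      · exfalso
        rw [hstep] at he
        have : st.2 = true := by rw [he]
        have : (xs.foldl (pvStepA crn) st).2 = true := pv_passA_flag_mono crn xs st this
        rw [this] at h; exact Bool.noConfusion h
    · exact h2 z hz' hzn

theorem pv_passA_sound (crn : List (List String × List String)) (signals : List String) :
    ∀ (xs : List String) (st : PySem.Set String × Bool),
      (∀ y ∈ st.1, pvNW crn signals y) →
      ∀ y ∈ (xs.foldl (pvStepA crn) st).1, pvNW crn signals y := by
  intro xs
  induction xs with
  | nil => intro st h; exact h
  | cons x xs ih =>
    intro st h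
    rw [List.foldl_cons]
    apply ih
    rcases pv_stepA_cases crn st x with he | ⟨_, hc, he⟩
    · rw [he]; exact h
    · rw [he]
      intro y hy
      rcases (PySem.Set.mem_add st.1 x y).mp hy with h' | rfl
      · exact h y h'
      · obtain ⟨rxn, hr, hx1, z, hznw, hzr⟩ := (pv_condA_iff crn st.1 y).mp hc
        exact pvNW.step hr hzr (h z hznw) hx1

theorem pv_passA_strict (crn : List (List String × List String)) :
    ∀ (xs : List String) (st : PySem.Set String × Bool),
      st.2 = false → (xs.foldl (pvStepA crn) st).2 = true →
      ∃ x ∈ xs, x ∉ st.1 ∧ x ∈ (xs.foldl (pvStepA crn) st).1 := by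
  intro xs
  induction xs with
  | nil => intro st h1 h2; rw [List.foldl_nil] at h2; rw [h1] at h2; exact absurd h2 (by simp)
  | cons x xs ih =>
    intro st h1 h2
    rw [List.foldl_cons] at h2 ⊢
    rcases pv_stepA_cases crn st x with he | ⟨hn, _, he⟩
    · rw [he] at h2 ⊢
      obtain ⟨z, hz, hzn, hzf⟩ := ih st h1 h2
      exact ⟨z, List.mem_cons_of_mem _ hz, hzn, hzf⟩
    · refine ⟨x, List.mem_cons_self, hn, ?_⟩
      apply pv_passA_mono
      rw [he]
      exact (PySem.Set.mem_add st.1 x x).mpr (Or.inr rfl)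

theorem pv_loopA_spec (crn : List (List String × List String)) (signals species : List String) :
    ∀ (fuel : Nat) (nw : PySem.Set String),
      species.countP (fun x => !(PySem.Set.contains nw x)) < fuel →
      (∀ y ∈ nw, y ∈ pvLoopA crn species fuel nw) ∧
      ((∀ y ∈ nw, pvNW crn signals y) → ∀ y ∈ pvLoopA crn species fuel nw, pvNW crn signals y) ∧
      (∀ x ∈ species, x ∉ pvLoopA crn species fuel nw → pvCondA crn (pvLoopA crn species fuel nw) x = false) := by
  intro fuel
  induction fuel with
  | zero => intro nw h; omega
  | succ fuel ih =>
    intro nw h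
    have hun : pvLoopA crn species (fuel+1) nw =
        if (pvPassA crn species nw).2 then pvLoopA crn species fuel (pvPassA crn species nw).1
        else (pvPassA crn species nw).1 := rfl
    cases hfl : (pvPassA crn species nw).2 with
    | false =>
      rw [hun, hfl, if_neg (by simp)]
      obtain ⟨heq, hcond⟩ := pv_passA_false crn species (nw, false) hfl
      rw [show (pvPassA crn species nw).1 = (species.foldl (pvStepA crn) (nw, false)).1 from rfl, heq]
      exact ⟨fun y hy => hy, fun hs y hy => hs y hy, hcond⟩
    | true =>
      rw [hun, hfl, if_pos (by simp)]
      -- strictly fewer missing species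
      obtain ⟨z, hzs, hznw, hzst⟩ := pv_passA_strict crn species (nw, false) rfl hfl
      have hmono : ∀ y ∈ nw, y ∈ (pvPassA crn species nw).1 :=
        fun y hy => pv_passA_mono crn species (nw, false) y hy
      have hdec : species.countP (fun x => !(PySem.Set.contains (pvPassA crn species nw).1 x))
          < species.countP (fun x => !(PySem.Set.contains nw x)) := by
        refine pv_countP_lt species (fun x => !(PySem.Set.contains nw x))
          (fun x => !(PySem.Set.contains (pvPassA crn species nw).1 x)) ?_ z hzs ?_ ?_
        · intro y hy hq
          dsimp only at hq ⊢
          rw [pv_contains_eq] at hq ⊢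
          simp only [Bool.not_eq_eq_eq_not, Bool.not_true, decide_eq_false_iff_not] at hq ⊢
          exact fun hyn => hq (hmono y hyn)
        · have hznw' : z ∉ nw := hznw
          dsimp only; rw [pv_contains_eq]; simpa using hznw'
        · have hzst' : z ∈ (pvPassA crn species nw).1 := hzst
          dsimp only; rw [pv_contains_eq]; simpa using hzst'
      obtain ⟨ih1, ih2, ih3⟩ := ih (pvPassA crn species nw).1 (by omega)
      refine ⟨fun y hy => ih1 y (hmono y hy), fun hs y hy => ?_, ih3⟩
      exact ih2 (fun z' hz' => pv_passA_sound crn signals species (nw, false) hs z' hz') y hy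

theorem pv_memA (crn : List (List String × List String)) (signals : List String) (y : String) :
    y ∈ pvLoopA crn (pvSpeciesB crn) ((pvSpeciesB crn).length + 1) (PySem.Set.ofList signals)
      ↔ pvNW crn signals y := by
  obtain ⟨hmono, hsound, hclosed⟩ :=
    pv_loopA_spec crn signals (pvSpeciesB crn) ((pvSpeciesB crn).length + 1) (PySem.Set.ofList signals)
      (by have := List.countP_le_length (p := fun x => !(PySem.Set.contains (PySem.Set.ofList signals) x)) (l := pvSpeciesB crn); omega)
  constructor
  · exact fun hy => hsound (fun z hz => pvNW.sig ((PySem.Set.mem_ofList signals z).mp hz)) y hy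
  · intro hNW
    induction hNW with
    | sig hx => exact hmono _ ((PySem.Set.mem_ofList signals _).mpr hx)
    | @step rxn z x hr hzr _ hx1 ihz =>
      by_contra hxF
      have hxS : x ∈ pvSpeciesB crn :=
        (pv_mem_speciesB crn x).mpr ⟨rxn, hr, List.mem_append.mpr (Or.inl hx1)⟩
      have hfalse := hclosed x hxS hxF
      have htrue : pvCondA crn (pvLoopA crn (pvSpeciesB crn) ((pvSpeciesB crn).length + 1) (PySem.Set.ofList signals)) x = true :=
        (pv_condA_iff crn _ x).mpr ⟨rxn, hr, hx1, z, ihz, hzr⟩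
      rw [htrue] at hfalse; exact Bool.noConfusion hfalse

-- ----- B-side lemmas -----
theorem pv_stepB_cases (st : PySem.Set String × List String) (x : String) :
    (x ∈ st.1 ∧ pvStepB st x = st) ∨
      (x ∉ st.1 ∧ pvStepB st x = (PySem.Set.add st.1 x, st.2 ++ [x])) := by
  unfold pvStepB
  rw [pv_contains_eq]
  by_cases h : x ∈ st.1
  · simp [h]
  · simp [h]

theorem pv_innerB_mono :
    ∀ (xs : List String) (st : PySem.Set String × List String) (y : String),
      y ∈ st.1 → y ∈ (xs.foldl pvStepB st).1 := by
  intro xs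
  induction xs with
  | nil => intro st y hy; exact hy
  | cons x xs ih =>
    intro st y hy
    rw [List.foldl_cons]
    apply ih
    rcases pv_stepB_cases st x with ⟨_, he⟩ | ⟨_, he⟩
    · rw [he]; exact hy
    · rw [he]; exact (PySem.Set.mem_add st.1 x y).mpr (Or.inl hy)

theorem pv_innerB_all :
    ∀ (xs : List String) (st : PySem.Set String × List String) (x : String),
      x ∈ xs → x ∈ (xs.foldl pvStepB st).1 := by
  intro xs
  induction xs with
  | nil => intro st x hx; simp at hx
  | cons a xs ih =>
    intro st x hx
    rw [List.foldl_cons]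
    rcases List.mem_cons.mp hx with rfl | hx'
    · apply pv_innerB_mono
      rcases pv_stepB_cases st x with ⟨hi, he⟩ | ⟨_, he⟩
      · rw [he]; exact hi
      · rw [he]; exact (PySem.Set.mem_add st.1 x x).mpr (Or.inr rfl)
    · exact ih _ x hx'

theorem pv_innerB_q_mono :
    ∀ (xs : List String) (st : PySem.Set String × List String) (y : String),
      y ∈ st.2 → y ∈ (xs.foldl pvStepB st).2 := by
  intro xs
  induction xs with
  | nil => intro st y hy; exact hy
  | cons x xs ih =>
    intro st y hy
    rw [List.foldl_cons]
    apply ih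
    rcases pv_stepB_cases st x with ⟨_, he⟩ | ⟨_, he⟩
    · rw [he]; exact hy
    · rw [he]; exact List.mem_append.mpr (Or.inl hy)

theorem pv_innerB_q_src :
    ∀ (xs : List String) (st : PySem.Set String × List String) (y : String),
      y ∈ (xs.foldl pvStepB st).2 → y ∈ st.2 ∨ y ∈ (xs.foldl pvStepB st).1 := by
  intro xs
  induction xs with
  | nil => intro st y hy; exact Or.inl hy
  | cons x xs ih =>
    intro st y hy
    rw [List.foldl_cons] at hy ⊢
    rcases ih _ y hy with h | h
    · rcases pv_stepB_cases st x with ⟨_, he⟩ | ⟨_, he⟩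
      · rw [he] at h; exact Or.inl h
      · rw [he] at h
        rcases List.mem_append.mp h with h' | h'
        · exact Or.inl h'
        · -- y = x which is in the set after the step
          have : y ∈ (pvStepB st x).1 := by
            rw [he]
            exact (PySem.Set.mem_add st.1 x y).mpr (Or.inr (List.mem_singleton.mp h'))
          exact Or.inr (pv_innerB_mono xs _ y this)
    · exact Or.inr h

theorem pv_innerB_new_q :
    ∀ (xs : List String) (st : PySem.Set String × List String) (y : String),
      y ∈ (xs.foldl pvStepB st).1 → y ∉ st.1 → y ∈ (xs.foldl pvStepB st).2 := by
  intro xs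
  induction xs with
  | nil => intro st y hy hyn; exact absurd hy hyn
  | cons x xs ih =>
    intro st y hy hyn
    rw [List.foldl_cons] at hy ⊢
    by_cases hmid : y ∈ (pvStepB st x).1
    · rcases pv_stepB_cases st x with ⟨_, he⟩ | ⟨_, he⟩
      · rw [he] at hmid; exact absurd hmid hyn
      · rw [he] at hmid
        rcases (PySem.Set.mem_add st.1 x y).mp hmid with h' | rfl
        · exact absurd h' hyn
        · apply pv_innerB_q_mono
          rw [he]
          exact List.mem_append.mpr (Or.inr (by simp))
    · exact ih _ y hy hmid

theorem pv_innerB_src :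
    ∀ (xs : List String) (st : PySem.Set String × List String) (y : String),
      y ∈ (xs.foldl pvStepB st).1 → y ∈ st.1 ∨ y ∈ xs := by
  intro xs
  induction xs with
  | nil => intro st y hy; exact Or.inl hy
  | cons x xs ih =>
    intro st y hy
    rw [List.foldl_cons] at hy
    rcases ih _ y hy with h | h
    · rcases pv_stepB_cases st x with ⟨_, he⟩ | ⟨_, he⟩
      · rw [he] at h; exact Or.inl h
      · rw [he] at h
        rcases (PySem.Set.mem_add st.1 x y).mp h with h' | rfl
        · exact Or.inl h'
        · exact Or.inr List.mem_cons_self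
    · exact Or.inr (List.mem_cons_of_mem _ h)

theorem pv_innerB_measure (S : List String) (hS : S.Nodup) :
    ∀ (xs : List String), (∀ x ∈ xs, x ∈ S) →
      ∀ (st : PySem.Set String × List String),
      S.countP (fun y => !(PySem.Set.contains (xs.foldl pvStepB st).1 y)) + (xs.foldl pvStepB st).2.length
        = S.countP (fun y => !(PySem.Set.contains st.1 y)) + st.2.length := by
  intro xs
  induction xs with
  | nil => intro _ st; rfl
  | cons x xs ih =>
    intro hxs st
    rw [List.foldl_cons]
    rcases pv_stepB_cases st x with ⟨_, he⟩ | ⟨hn, he⟩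
    · rw [he]; exact ih (fun z hz => hxs z (List.mem_cons_of_mem _ hz)) st
    · rw [he]
      have hstep := ih (fun z hz => hxs z (List.mem_cons_of_mem _ hz)) (PySem.Set.add st.1 x, st.2 ++ [x])
      have hpoint : S.countP (fun y => !(PySem.Set.contains ((PySem.Set.add st.1 x, st.2 ++ [x]).1) y)) + 1
          = S.countP (fun y => !(PySem.Set.contains st.1 y)) := by
        apply pv_countP_point S _ _ x hS (hxs x List.mem_cons_self)
        · intro y _ hyx
          dsimp only
          rw [pv_contains_eq, pv_contains_eq]
          have : y ∈ PySem.Set.add st.1 x ↔ y ∈ st.1 := by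
            rw [PySem.Set.mem_add]
            exact ⟨fun h => h.resolve_right hyx, Or.inl⟩
          simp [this]
        · dsimp only
          rw [pv_contains_eq]
          simp [(PySem.Set.mem_add st.1 x x).mpr (Or.inr rfl)]
        · dsimp only
          rw [pv_contains_eq]; simpa using hn
      have hql : ((PySem.Set.add st.1 x, st.2 ++ [x]).2).length = st.2.length + 1 := by simp
      omega

-- outer fold (over a generic reaction list l) lemmas
theorem pv_relaxB_mono (s : String) :
    ∀ (l : List (List String × List String)) (st : PySem.Set String × List String) (y : String),
      y ∈ st.1 → y ∈ (l.foldl (pvRelaxStep s) st).1 := by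
  intro l
  induction l with
  | nil => intro st y hy; exact hy
  | cons rxn l ih =>
    intro st y hy
    rw [List.foldl_cons]
    apply ih
    unfold pvRelaxStep
    split_ifs with hb
    · exact pv_innerB_mono rxn.1 st y hy
    · exact hy

theorem pv_relaxB_q_mono (s : String) :
    ∀ (l : List (List String × List String)) (st : PySem.Set String × List String) (y : String),
      y ∈ st.2 → y ∈ (l.foldl (pvRelaxStep s) st).2 := by
  intro l
  induction l with
  | nil => intro st y hy; exact hy
  | cons rxn l ih =>
    intro st y hy
    rw [List.foldl_cons]
    apply ih
    unfold pvRelaxStep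
    split_ifs with hb
    · exact pv_innerB_q_mono rxn.1 st y hy
    · exact hy

theorem pv_relaxB_q_src (s : String) :
    ∀ (l : List (List String × List String)) (st : PySem.Set String × List String) (y : String),
      y ∈ (l.foldl (pvRelaxStep s) st).2 → y ∈ st.2 ∨ y ∈ (l.foldl (pvRelaxStep s) st).1 := by
  intro l
  induction l with
  | nil => intro st y hy; exact Or.inl hy
  | cons rxn l ih =>
    intro st y hy
    rw [List.foldl_cons] at hy ⊢
    rcases ih _ y hy with h | h
    · unfold pvRelaxStep at h ⊢
      split_ifs at h ⊢ with hb
      · rcases pv_innerB_q_src rxn.1 st y h with h' | h'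
        · exact Or.inl h'
        · exact Or.inr (pv_relaxB_mono s l _ y h')
      · exact Or.inl h
    · exact Or.inr h

theorem pv_relaxB_new_q (s : String) :
    ∀ (l : List (List String × List String)) (st : PySem.Set String × List String) (y : String),
      y ∈ (l.foldl (pvRelaxStep s) st).1 → y ∉ st.1 → y ∈ (l.foldl (pvRelaxStep s) st).2 := by
  intro l
  induction l with
  | nil => intro st y hy hyn; exact absurd hy hyn
  | cons rxn l ih =>
    intro st y hy hyn
    rw [List.foldl_cons] at hy ⊢
    by_cases hmid : y ∈ (pvRelaxStep s st rxn).1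
    · have hq : y ∈ (pvRelaxStep s st rxn).2 := by
        unfold pvRelaxStep at hmid ⊢
        split_ifs at hmid ⊢ with hb
        · exact pv_innerB_new_q rxn.1 st y hmid hyn
        · exact absurd hmid hyn
      exact pv_relaxB_q_mono s l _ y hq
    · exact ih _ y hy hmid

theorem pv_relaxB_processed (s : String) :
    ∀ (l : List (List String × List String)) (st : PySem.Set String × List String)
      (rxn : List String × List String),
      rxn ∈ l → s ∈ rxn.1 ++ rxn.2 → ∀ x ∈ rxn.1, x ∈ (l.foldl (pvRelaxStep s) st).1 := by
  intro l
  induction l with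
  | nil => intro st rxn hr; simp at hr
  | cons rxn0 l ih =>
    intro st rxn hr hs x hx
    rw [List.foldl_cons]
    rcases List.mem_cons.mp hr with rfl | hr'
    · apply pv_relaxB_mono
      have hb : (rxn.1.contains s || rxn.2.contains s) = true := by
        rcases List.mem_append.mp hs with h | h
        · simp [h]
        · simp [h]
      unfold pvRelaxStep
      rw [hb, if_pos rfl]
      exact pv_innerB_all rxn.1 st x hx
    · exact ih _ rxn hr' hs x hx

theorem pv_relaxB_sound (crn : List (List String × List String)) (signals : List String) (s : String)
    (hs : pvNW crn signals s) :
    ∀ (l : List (List String × List String)), (∀ r ∈ l, r ∈ crn) →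
      ∀ (st : PySem.Set String × List String),
      (∀ y ∈ st.1, pvNW crn signals y) →
      ∀ y ∈ (l.foldl (pvRelaxStep s) st).1, pvNW crn signals y := by
  intro l
  induction l with
  | nil => intro _ st h; exact h
  | cons rxn l ih =>
    intro hsub st h
    rw [List.foldl_cons]
    apply ih (fun r hr => hsub r (List.mem_cons_of_mem _ hr))
    intro y hy
    unfold pvRelaxStep at hy
    split_ifs at hy with hb
    · rcases pv_innerB_src rxn.1 st y hy with h' | h'
      · exact h y h'
      · have hsr : s ∈ rxn.1 ++ rxn.2 := by
          rw [List.mem_append]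
          simpa using hb
        exact pvNW.step (hsub rxn List.mem_cons_self) hsr hs h'
    · exact h y hy

theorem pv_relaxB_measure (s : String) (S : List String) (hS : S.Nodup) :
    ∀ (l : List (List String × List String)), (∀ rxn ∈ l, ∀ x ∈ rxn.1, x ∈ S) →
      ∀ (st : PySem.Set String × List String),
      S.countP (fun y => !(PySem.Set.contains (l.foldl (pvRelaxStep s) st).1 y)) + (l.foldl (pvRelaxStep s) st).2.length
        = S.countP (fun y => !(PySem.Set.contains st.1 y)) + st.2.length := by
  intro l
  induction l with
  | nil => intro _ st; rfl
  | cons rxn l ih =>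
    intro hsub st
    rw [List.foldl_cons]
    rw [ih (fun r hr => hsub r (List.mem_cons_of_mem _ hr)) (pvRelaxStep s st rxn)]
    unfold pvRelaxStep
    split_ifs with hb
    · exact pv_innerB_measure S hS rxn.1 (hsub rxn List.mem_cons_self) st
    · rfl

theorem pv_bfsB_spec (crn : List (List String × List String)) (signals : List String)
    (S : List String) (hS : S.Nodup) (hreact : ∀ rxn ∈ crn, ∀ x ∈ rxn.1, x ∈ S) :
    ∀ (fuel : Nat) (nw : PySem.Set String) (q : List String),
      S.countP (fun y => !(PySem.Set.contains nw y)) + q.length ≤ fuel →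
      (∀ y ∈ q, y ∈ nw) →
      (∀ y ∈ nw, pvNW crn signals y) →
      (∀ rxn ∈ crn, ∀ y ∈ rxn.1 ++ rxn.2, y ∈ nw → y ∉ q → ∀ x ∈ rxn.1, x ∈ nw) →
      (∀ y ∈ nw, y ∈ pvBfsB crn fuel nw q) ∧
      (∀ y ∈ pvBfsB crn fuel nw q, pvNW crn signals y) ∧
      (∀ rxn ∈ crn, ∀ y ∈ rxn.1 ++ rxn.2, y ∈ pvBfsB crn fuel nw q → ∀ x ∈ rxn.1, x ∈ pvBfsB crn fuel nw q) := by
  intro fuel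
  induction fuel with
  | zero =>
    intro nw q hm hq hsound hI
    have hq0 : q = [] := List.length_eq_zero_iff.mp (by omega)
    subst hq0
    exact ⟨fun y hy => hy, hsound,
      fun rxn hr y hyr hy x hx => hI rxn hr y hyr hy (by simp) x hx⟩
  | succ fuel ih =>
    intro nw q hm hq hsound hI
    cases q with
    | nil =>
      exact ⟨fun y hy => hy, hsound,
        fun rxn hr y hyr hy x hx => hI rxn hr y hyr hy (by simp) x hx⟩
    | cons s rest =>
      simp only [pvBfsB]
      have hsnw : s ∈ nw := hq s List.mem_cons_self
      have hsNW : pvNW crn signals s := hsound s hsnw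
      -- abbreviations
      have hrelax : pvRelaxB crn s (nw, rest) = crn.foldl (pvRelaxStep s) (nw, rest) := rfl
      rw [hrelax]
      set out := crn.foldl (pvRelaxStep s) (nw, rest) with hout
      have hmono : ∀ y ∈ nw, y ∈ out.1 := fun y hy => pv_relaxB_mono s crn (nw, rest) y hy
      -- measure
      have hmeas : S.countP (fun y => !(PySem.Set.contains out.1 y)) + out.2.length
          = S.countP (fun y => !(PySem.Set.contains nw y)) + rest.length :=
        pv_relaxB_measure s S hS crn hreact (nw, rest)
      have hm' : S.countP (fun y => !(PySem.Set.contains out.1 y)) + out.2.length ≤ fuel := by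
        rw [hmeas]
        simp only [List.length_cons] at hm
        omega
      -- queue ⊆ set
      have hq' : ∀ y ∈ out.2, y ∈ out.1 := by
        intro y hy
        rcases pv_relaxB_q_src s crn (nw, rest) y hy with h | h
        · exact hmono y (hq y (List.mem_cons_of_mem _ h))
        · exact h
      -- soundness
      have hsound' : ∀ y ∈ out.1, pvNW crn signals y :=
        pv_relaxB_sound crn signals s hsNW crn (fun r hr => hr) (nw, rest) hsound
      -- invariant
      have hI' : ∀ rxn ∈ crn, ∀ y ∈ rxn.1 ++ rxn.2, y ∈ out.1 → y ∉ out.2 → ∀ x ∈ rxn.1, x ∈ out.1 := by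
        intro rxn hr y hyr hy hynq x hx
        by_cases hynw : y ∈ nw
        · by_cases hys : y = s
          · exact pv_relaxB_processed s crn (nw, rest) rxn hr (hys ▸ hyr) x hx
          · have hynrest : y ∉ rest := fun hc => hynq (pv_relaxB_q_mono s crn (nw, rest) y hc)
            have : y ∉ s :: rest := by
              intro hc
              rcases List.mem_cons.mp hc with h | h
              · exact hys h
              · exact hynrest h
            exact hmono x (hI rxn hr y hyr hynw this x hx)
        · exact absurd (pv_relaxB_new_q s crn (nw, rest) y hy hynw) hynq
      obtain ⟨ih1, ih2, ih3⟩ := ih out.1 out.2 hm' hq' hsound' hI'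
      exact ⟨fun y hy => ih1 y (hmono y hy), ih2, ih3⟩

theorem pv_memB (crn : List (List String × List String)) (signals : List String) (y : String) :
    y ∈ pvBfsB crn ((PySem.Set.ofList signals).length + (pvSpeciesB crn).length)
        (PySem.Set.ofList signals) (PySem.Set.ofList signals)
      ↔ pvNW crn signals y := by
  have hreact : ∀ rxn ∈ crn, ∀ x ∈ rxn.1, x ∈ pvSpeciesB crn :=
    fun rxn hr x hx => (pv_mem_speciesB crn x).mpr ⟨rxn, hr, List.mem_append.mpr (Or.inl hx)⟩
  obtain ⟨hmono, hsound, hclosed⟩ :=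
    pv_bfsB_spec crn signals (pvSpeciesB crn) (pv_nodup_speciesB crn) hreact
      ((PySem.Set.ofList signals).length + (pvSpeciesB crn).length)
      (PySem.Set.ofList signals) (PySem.Set.ofList signals)
      (by
        have := List.countP_le_length (p := fun x => !(PySem.Set.contains (PySem.Set.ofList signals) x)) (l := pvSpeciesB crn)
        omega)
      (fun y hy => hy)
      (fun z hz => pvNW.sig ((PySem.Set.mem_ofList signals z).mp hz))
      (fun rxn _ z _ hz hznq => absurd hz hznq)
  constructor
  · exact fun hy => hsound y hy
  · intro hNW
    induction hNW with
    | sig hx => exact hmono _ ((PySem.Set.mem_ofList signals _).mpr hx)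
    | @step rxn z x hr hzr _ hx1 ihz =>
      exact hclosed rxn hr z hzr ihz x hx1

-- ----- assembly -----
theorem pv_foldl_add_filter (p : String → Bool) :
    ∀ (l acc : List String), (∀ x ∈ l, x ∉ acc) → l.Nodup →
      l.foldl (fun acc w => if p w then PySem.Set.add acc w else acc) acc = acc ++ l.filter p := by
  intro l
  induction l with
  | nil => intro acc _ _; simp
  | cons w l ih =>
    intro acc hdisj hnd
    rw [List.foldl_cons, List.filter_cons]
    by_cases hp : p w = true
    · rw [if_pos hp, if_pos hp]
      rw [PySem.Set.add_of_not_mem (hdisj w List.mem_cons_self)]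
      rw [ih (acc ++ [w]) ?_ (List.nodup_cons.mp hnd).2]
      · simp
      · intro x hx
        rw [List.mem_append]
        rintro (h | h)
        · exact hdisj x (List.mem_cons_of_mem _ hx) h
        · exact (List.nodup_cons.mp hnd).1 (List.mem_singleton.mp h ▸ hx)
    · rw [if_neg hp, if_neg hp]
      exact ih acc (fun x hx => hdisj x (List.mem_cons_of_mem _ hx)) (List.nodup_cons.mp hnd).2

-- ===== VERDICT (by name: the statement is the Claim_ definition above) =====
theorem assign_crn_species_spec : Claim_equal_assign_crn_species := by
  intro crn signals _hdom
  unfold Spec_assign_crn_species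
  show assign_crn_species crn signals = assign_crn_species_alt crn signals
  unfold assign_crn_species assign_crn_species_alt
  simp only [pv_speciesA_eq]
  set S := pvSpeciesB crn with hSdef
  set sig := PySem.Set.ofList signals with hsig
  set FA := pvLoopA crn S (S.length + 1) sig with hFA
  set FB := pvBfsB crn (sig.length + S.length) sig sig with hFB
  have hmem : ∀ y, y ∈ FA ↔ y ∈ FB :=
    fun y => (pv_memA crn signals y).trans (pv_memB crn signals y).symm
  have hc : ∀ y, PySem.Set.contains FA y = PySem.Set.contains FB y := by
    intro y
    rw [pv_contains_eq, pv_contains_eq]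
    exact decide_eq_decide.mpr (hmem y)
  have hSnd : S.Nodup := pv_nodup_speciesB crn
  -- wastes agree
  have hw : PySem.Set.diff S FA = S.filter (fun x => !(PySem.Set.contains FB x)) := by
    show S.filter (fun x => !(PySem.Set.contains FA x)) = _
    exact List.filter_congr (fun x _ => by rw [hc x])
  refine Prod.ext ?_ (Prod.ext ?_ ?_)
  · -- intermediates
    show (PySem.Set.diff (PySem.Set.diff S sig) (PySem.Set.diff S FA))
        = S.filter (fun x => PySem.Set.contains FB x && !(PySem.Set.contains sig x))
    show ((S.filter (fun x => !(PySem.Set.contains sig x))).filter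
            (fun x => !(PySem.Set.contains (PySem.Set.diff S FA) x))) = _
    rw [List.filter_filter]
    apply List.filter_congr
    intro x hxS
    have hxdiff : x ∈ PySem.Set.diff S FA ↔ x ∉ FA := by
      show x ∈ S.filter (fun z => !(PySem.Set.contains FA z)) ↔ _
      rw [List.mem_filter, pv_contains_eq]
      simp [hxS]
    by_cases hA : x ∈ FA
    · have hB : x ∈ FB := (hmem x).mp hA
      simp [hB, hxdiff, hA]
    · have hB : x ∉ FB := fun h => hA ((hmem x).mpr h)
      have hxd : x ∈ PySem.Set.diff S FA := hxdiff.mpr hA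
      simp [hB, hxd]
  · -- wastes
    exact hw
  · -- reactive wastes
    show (PySem.Set.diff S FA).foldl
        (fun acc w => if crn.any (fun rxn => rxn.1.contains w) then PySem.Set.add acc w else acc)
        PySem.Set.empty
      = (S.filter (fun x => !(PySem.Set.contains FB x))).filter
          (fun w => crn.any (fun rxn => rxn.1.contains w))
    have hnd : (PySem.Set.diff S FA).Nodup := by
      show (S.filter (fun x => !(PySem.Set.contains FA x))).Nodup
      exact hSnd.filter _
    rw [pv_foldl_add_filter _ (PySem.Set.diff S FA) PySem.Set.empty (by intro x _; simp [PySem.Set.empty]) hnd]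
    rw [hw]
    rfl
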